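-- pv_equiv track=rewrite | github.com/CatiaBio/PlantEuka | scripts/quick_clean.py | clean_sequence
-- ===== SOURCE A (Python) =====
-- from collections import Counter
--
-- def clean_sequence(sequence):
--     replaced_characters = Counter()
--     cleaned_sequence = []
--
--     for nucleotide in sequence:
--         if nucleotide not in 'ACGTN':
--             cleaned_sequence.append('N')
--             replaced_characters[nucleotide] += 1
--         else:
--             cleaned_sequence.append(nucleotide)
--
--     return ''.join(cleaned_sequence), replaced_characters
-- ===== SOURCE B (Python) =====
-- from collections import Counter
--
-- def clean_sequence(sequence):
--     totals = Counter(sequence)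
--     replaced = Counter({ch: n for ch, n in totals.items() if ch not in 'ACGTN'})
--     table = str.maketrans({ch: 'N' for ch in totals if ch not in 'ACGTN'})
--     return sequence.translate(table), replaced
-- ===== Notes on version B (the rewrite author's own statement) =====
-- stated objective: alternative
-- what changed: A increments a per-character tally and appends to the output inside one fused loop; B instead takes one Counter of the whole sequence, derives the invalid tally by filtering those totals, and produces the cleaned string with str.translate through a table built from the tally's keys.
import Mathlib
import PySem

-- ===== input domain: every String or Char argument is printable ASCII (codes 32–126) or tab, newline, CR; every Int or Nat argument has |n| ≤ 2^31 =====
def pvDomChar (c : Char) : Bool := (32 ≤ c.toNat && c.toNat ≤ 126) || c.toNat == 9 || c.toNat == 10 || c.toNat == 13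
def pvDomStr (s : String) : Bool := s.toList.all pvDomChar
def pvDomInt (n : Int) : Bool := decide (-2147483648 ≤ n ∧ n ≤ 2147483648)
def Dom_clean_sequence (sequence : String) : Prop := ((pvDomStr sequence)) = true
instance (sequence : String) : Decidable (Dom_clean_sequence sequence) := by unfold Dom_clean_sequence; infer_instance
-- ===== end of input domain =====

-- B replaces A's fused per-character append-and-increment loop by one Counter of the whole sequence,
-- a filter of its totals for the invalid tally, and str.translate through a table built from those keys (alternative decomposition, same cost).
-- ===== PORT A =====
def clean_sequence (sequence : String) : String × (List (String × Int)) :=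
  let st := sequence.toList.foldl
    (fun (st : PySem.Dict String Int × List Char) nucleotide =>
      if nucleotide ∉ ['A', 'C', 'G', 'T', 'N'] then
        (st.1.modify (String.ofList [nucleotide]) 0 (· + 1), st.2 ++ ['N'])
      else
        (st.1, st.2 ++ [nucleotide]))
    (PySem.Dict.empty, [])
  (String.ofList st.2, st.1.items)

-- ===== PORT B =====
def clean_sequence_alt (sequence : String) : String × (List (String × Int)) :=
  let totals := PySem.Dict.counter sequence.toList
  let replaced : PySem.Dict String Int :=
    ((totals.items.filter (fun p => p.1 ∉ ['A', 'C', 'G', 'T', 'N'])).map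
        (fun p => (String.ofList [p.1], p.2))).foldl
      (fun d p => d.insert p.1 p.2) PySem.Dict.empty
  -- str.maketrans/str.translate ported by hand: the table is keyed by the Char itself instead of its
  -- ordinal (ord is injective, so lookup is the same) and a char absent from the table maps to itself — exact.
  let table : PySem.Dict Char Char :=
    ((totals.keys.filter (fun c => c ∉ ['A', 'C', 'G', 'T', 'N'])).map
        (fun c => (c, 'N'))).foldl
      (fun d p => d.insert p.1 p.2) PySem.Dict.empty
  (String.ofList (sequence.toList.map (fun c => (table.get? c).getD c)), replaced.items)

-- ===== PRECONDITION & SPEC =====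
def Spec_clean_sequence (sequence : String) (out : String × (List (String × Int))) : Prop := out = clean_sequence_alt sequence
instance (sequence : String) (out : String × (List (String × Int))) : Decidable (Spec_clean_sequence sequence out) := by unfold Spec_clean_sequence; infer_instance

-- ===== CLAIM (what is proved, stated in full; the proofs are below) =====
def Claim_equal_clean_sequence : Prop := ∀ (sequence : String), Dom_clean_sequence sequence → Spec_clean_sequence sequence (clean_sequence sequence)

-- ===== LEMMAS AND PROOFS =====

-- the single-character-string embedding is injective
lemma ofList_single_injective : Function.Injective (fun c : Char => String.ofList [c]) := by
  intro a b h
  have := congrArg String.toList h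
  simpa using this

-- Loop invariant for A: the fused fold is the counter fold over the invalid characters (as strings)
-- paired with the character-wise masked list.
lemma clean_sequence_loop (l : List Char) (d : PySem.Dict String Int) (acc : List Char) :
    l.foldl
      (fun (st : PySem.Dict String Int × List Char) nucleotide =>
        if nucleotide ∉ ['A', 'C', 'G', 'T', 'N'] then
          (st.1.modify (String.ofList [nucleotide]) 0 (· + 1), st.2 ++ ['N'])
        else
          (st.1, st.2 ++ [nucleotide]))
      (d, acc)
    = (((l.filter (fun c => c ∉ ['A', 'C', 'G', 'T', 'N'])).map
          (fun c => String.ofList [c])).foldl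
        (fun d x => d.modify x 0 (· + 1)) d,
       acc ++ l.map (fun c => if c ∉ ['A', 'C', 'G', 'T', 'N'] then 'N' else c)) := by
  induction l generalizing d acc with
  | nil => simp
  | cons c l ih =>
    rw [List.foldl_cons]
    by_cases h : c = 'A' ∨ c = 'C' ∨ c = 'G' ∨ c = 'T' ∨ c = 'N'
    · rcases h with h | h | h | h | h <;> subst h <;>
        rw [if_neg (by decide), ih] <;> simp
    · push Not at h
      obtain ⟨h1, h2, h3, h4, h5⟩ := h
      rw [if_pos (by simp [h1, h2, h3, h4, h5]), ih]
      simp [h1, h2, h3, h4, h5]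

-- set(filter) = filter(set): ofList commutes with filter (stated on the defining foldl).
lemma ofList_filter_foldl (p : Char → Bool) (l : List Char) (s : PySem.Set Char) :
    (l.foldl PySem.Set.add s).filter p = (l.filter p).foldl PySem.Set.add (s.filter p) := by
  induction l generalizing s with
  | nil => simp
  | cons x l ih =>
    rw [List.foldl_cons, ih]
    by_cases hp : p x = true
    · have hstep : (PySem.Set.add s x).filter p = PySem.Set.add (s.filter p) x := by
        rw [PySem.Set.add_eq_ite, PySem.Set.add_eq_ite]
        by_cases hm : x ∈ s
        · simp [hm, List.mem_filter, hp]
        · simp [hm, List.mem_filter, List.filter_append, hp]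
      simp [hp, hstep, List.foldl_cons]
    · have hx : p x = false := by simpa using hp
      have hstep : (PySem.Set.add s x).filter p = s.filter p := by
        rw [PySem.Set.add_eq_ite]
        by_cases hm : x ∈ s
        · simp [hm]
        · simp [hm, List.filter_append, hx]
      simp [hx, hstep]

lemma ofList_filter (p : Char → Bool) (l : List Char) :
    PySem.Set.ofList (l.filter p) = (PySem.Set.ofList l).filter p := by
  rw [PySem.Set.ofList_eq_foldl, PySem.Set.ofList_eq_foldl, ofList_filter_foldl]
  rfl

-- ofList commutes with an injective map (stated on the defining foldl).
lemma ofList_map_foldl (f : Char → String) (hf : Function.Injective f) (l : List Char)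
    (s : PySem.Set Char) :
    (l.map f).foldl PySem.Set.add (s.map f) = (l.foldl PySem.Set.add s).map f := by
  induction l generalizing s with
  | nil => simp
  | cons x l ih =>
    rw [List.map_cons, List.foldl_cons, List.foldl_cons]
    have hstep : PySem.Set.add (s.map f) (f x) = (PySem.Set.add s x).map f := by
      rw [PySem.Set.add_eq_ite, PySem.Set.add_eq_ite]
      by_cases hm : x ∈ s
      · simp [hm, (List.mem_map_of_injective hf).mpr hm]
      · have hm' : f x ∉ List.map f s := fun hh => hm ((List.mem_map_of_injective hf).mp hh)
        simp [hm, hm']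
    rw [hstep, ih]

lemma ofList_map (f : Char → String) (hf : Function.Injective f) (l : List Char) :
    PySem.Set.ofList (l.map f) = (PySem.Set.ofList l).map f := by
  rw [PySem.Set.ofList_eq_foldl, PySem.Set.ofList_eq_foldl, ← ofList_map_foldl f hf]
  rfl

-- items of a fold inserting distinct fresh keys into an empty dict: the pair list itself.
lemma items_fresh_fold {kk vv bb : Type} [BEq kk] [LawfulBEq kk] (l : List bb) (k : bb → kk)
    (v : bb → vv) (h : (l.map k).Nodup) :
    ((l.foldl (fun d a => d.insert (k a) (v a)) (PySem.Dict.empty : PySem.Dict kk vv))).items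
      = l.map (fun a => (k a, v a)) := by
  rw [PySem.Dict.items_foldl_insert_fresh l k v PySem.Dict.empty (by intro a _; rfl) h]
  rfl

-- the invalid distinct characters of l, in first-occurrence order
def invD (l : List Char) : List Char :=
  (PySem.Set.ofList l).filter (fun c => c ∉ ['A', 'C', 'G', 'T', 'N'])

lemma nodup_invD (l : List Char) : (invD l).Nodup :=
  (PySem.Set.nodup_ofList l).filter _

-- B's translation table, looked up at a character of l, masks exactly the invalid characters.
lemma translate_char (l : List Char) (c : Char) (hc : c ∈ l) :
    ((((invD l).map (fun c => (c, 'N'))).foldl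
        (fun d p => d.insert p.1 p.2)
        (PySem.Dict.empty : PySem.Dict Char Char)).get? c).getD c
      = if c ∉ ['A', 'C', 'G', 'T', 'N'] then 'N' else c := by
  have hitems :
      (((invD l).map (fun c => (c, 'N'))).foldl
          (fun d p => d.insert p.1 p.2)
          (PySem.Dict.empty : PySem.Dict Char Char)).items
        = (invD l).map (fun c => (c, 'N')) := by
    have h := items_fresh_fold ((invD l).map (fun c => (c, 'N')))
      (fun a => a.1) (fun a => a.2)
      (by rw [List.map_map]; simpa [Function.comp_def] using nodup_invD l)
    simpa using h
  have hkeys :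
      (((invD l).map (fun c => (c, 'N'))).foldl
          (fun d p => d.insert p.1 p.2)
          (PySem.Dict.empty : PySem.Dict Char Char)).keys
        = invD l := by
    simp only [PySem.Dict.keys, hitems, List.map_map]
    simp [Function.comp_def]
  by_cases h : c ∈ ['A', 'C', 'G', 'T', 'N']
  · have hnot : c ∉ (((invD l).map (fun c => (c, 'N'))).foldl
        (fun d p => d.insert p.1 p.2)
        (PySem.Dict.empty : PySem.Dict Char Char)).keys := by
      rw [hkeys]
      intro hcd
      have h2 := (List.mem_filter.mp hcd).2
      rw [decide_eq_true_eq] at h2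
      exact h2 h
    rw [(PySem.Dict.get?_eq_none_iff_not_mem_keys _ _).mpr hnot]
    simp only [Option.getD_none]
    rw [if_neg (not_not_intro h)]
  · have hD : c ∈ invD l :=
      List.mem_filter.mpr ⟨(PySem.Set.mem_ofList l c).mpr hc, by simpa using h⟩
    have hmem : (c, 'N') ∈ (((invD l).map (fun c => (c, 'N'))).foldl
        (fun d p => d.insert p.1 p.2)
        (PySem.Dict.empty : PySem.Dict Char Char)).items := by
      rw [hitems]
      exact List.mem_map.mpr ⟨c, hD, rfl⟩
    have hnodup : (((invD l).map (fun c => (c, 'N'))).foldl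
        (fun d p => d.insert p.1 p.2)
        (PySem.Dict.empty : PySem.Dict Char Char)).keys.Nodup := by
      rw [hkeys]; exact nodup_invD l
    rw [PySem.Dict.get?_of_mem_items _ hmem hnodup]
    simp only [Option.getD_some]
    rw [if_pos h]

-- A's result in canonical form.
lemma clean_sequence_eq (sequence : String) :
    clean_sequence sequence
      = (String.ofList (sequence.toList.map
            (fun c => if c ∉ ['A', 'C', 'G', 'T', 'N'] then 'N' else c)),
         (invD sequence.toList).map
            (fun c => (String.ofList [c], (sequence.toList.count c : Int)))) := by
  unfold clean_sequence
  rw [clean_sequence_loop]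
  refine congrArg₂ Prod.mk (by simp) ?_
  rw [← PySem.Dict.counter_eq_foldl, PySem.Dict.items_counter,
      ofList_map _ ofList_single_injective, ofList_filter, List.map_map]
  refine List.map_congr_left ?_
  intro c hc
  have hp : decide (c ∉ ['A', 'C', 'G', 'T', 'N']) = true := (List.mem_filter.mp hc).2
  simp only [Function.comp_def]
  rw [List.count_map_of_injective _ _ ofList_single_injective]
  refine congrArg₂ Prod.mk rfl ?_
  have hcf : List.count c (List.filter (fun c => decide (c ∉ ['A', 'C', 'G', 'T', 'N']))
      sequence.toList) = List.count c sequence.toList := List.count_filter hp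
  rw [hcf]

-- B's result in canonical form.
lemma clean_sequence_alt_eq (sequence : String) :
    clean_sequence_alt sequence
      = (String.ofList (sequence.toList.map
            (fun c => if c ∉ ['A', 'C', 'G', 'T', 'N'] then 'N' else c)),
         (invD sequence.toList).map
            (fun c => (String.ofList [c], (sequence.toList.count c : Int)))) := by
  unfold clean_sequence_alt
  simp only [PySem.Dict.items_counter, PySem.Dict.keys_counter]
  refine congrArg₂ Prod.mk ?_ ?_
  · refine congrArg String.ofList (List.map_congr_left ?_)
    intro c hc
    exact translate_char sequence.toList c hc
  · rw [List.filter_map, List.map_map]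
    have hpairs :
        ((PySem.Set.ofList sequence.toList).filter
            ((fun p : Char × Int => decide (p.1 ∉ ['A', 'C', 'G', 'T', 'N'])) ∘
              (fun k => (k, (sequence.toList.count k : Int)))))
          = invD sequence.toList := by
      simp [invD, Function.comp_def]
    rw [hpairs]
    have h := items_fresh_fold
      ((invD sequence.toList).map
        ((fun p : Char × Int => (String.ofList [p.1], p.2)) ∘
          (fun k => (k, (sequence.toList.count k : Int)))))
      (fun a => a.1) (fun a => a.2)
      (by
        rw [List.map_map]
        refine List.Nodup.map ?_ (nodup_invD sequence.toList)
        intro a b hab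
        exact ofList_single_injective (by simpa [Function.comp_def] using hab))
    simpa using h

-- ===== VERDICT (by name: the statement is the Claim_ definition above) =====
theorem clean_sequence_spec : Claim_equal_clean_sequence := by
  intro sequence _
  unfold Spec_clean_sequence
  rw [clean_sequence_eq, clean_sequence_alt_eq]
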